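-- pv_equiv track=rewrite | github.com/mercijonas/feladat1 | feladat1.py | feladat_18
-- ===== SOURCE A (Python) =====
-- def feladat_18(a,b):
--     x=a
--     y=b
--     p=0
--     while x>0:
--         if x%2==1:
--             p=p+y
--         else:
--             break
--         x=x//2
--         y=y+y
--     return p
-- ===== SOURCE B (Python) =====
-- def feladat_18(a, b):
--     x = a
--     k = 0
--     while x > 0 and x % 2 == 1:
--         k += 1
--         x //= 2
--     return b * ((1 << k) - 1)
-- ===== Notes on version B (the rewrite author's own statement) =====
-- stated objective: simpler
-- what changed: Counts the trailing one-bits k of a in a simple loop and returns the closed form b*((1<<k)-1), instead of accumulating b+2b+4b+... while halving a.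
import Mathlib
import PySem

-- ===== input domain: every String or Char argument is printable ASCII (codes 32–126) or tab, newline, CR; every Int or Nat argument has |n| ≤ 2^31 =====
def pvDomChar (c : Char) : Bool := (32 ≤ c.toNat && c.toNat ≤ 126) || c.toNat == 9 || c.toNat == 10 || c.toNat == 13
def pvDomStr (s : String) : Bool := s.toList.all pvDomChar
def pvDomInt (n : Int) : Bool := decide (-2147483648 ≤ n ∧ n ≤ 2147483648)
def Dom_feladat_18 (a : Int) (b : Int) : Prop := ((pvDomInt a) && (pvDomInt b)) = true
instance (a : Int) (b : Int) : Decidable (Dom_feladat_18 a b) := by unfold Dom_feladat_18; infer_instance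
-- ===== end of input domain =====

-- B replaces A's accumulate-while-doubling loop by counting the trailing one-bits k of a
-- and returning the closed form b * (2^k - 1); objective: simpler.


-- termination helper for both loops (cited in decreasing_by)
theorem pvHalfLt_feladat_18 (x : Int) (h : 0 < x) :
    (PySem.Int.floordiv x 2).toNat < x.toNat := by
  rw [PySem.Int.floordiv_eq_ediv_of_pos (by omega)]
  omega

-- ===== PORT A =====
-- the while loop of A: state (x, y, p); body 'if x%2==1: p+=y else break; x//=2; y+=y'
def feladat18Loop (x y p : Int) : Int :=
  if _h : 0 < x then
    if PySem.Int.mod x 2 = 1 then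
      feladat18Loop (PySem.Int.floordiv x 2) (y + y) (p + y)
    else p
  else p
termination_by x.toNat
decreasing_by exact pvHalfLt_feladat_18 x _h

def feladat_18 (a : Int) (b : Int) : Int := feladat18Loop a b 0

-- ===== PORT B =====
-- the counting loop of B: 'while x > 0 and x % 2 == 1: k += 1; x //= 2'
def feladat18Count (x : Int) : Nat :=
  if h : 0 < x ∧ PySem.Int.mod x 2 = 1 then
    feladat18Count (PySem.Int.floordiv x 2) + 1
  else 0
termination_by x.toNat
decreasing_by exact pvHalfLt_feladat_18 x h.1

-- '1 << k' in Python is 2^k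
def feladat_18_alt (a : Int) (b : Int) : Int := b * ((2 : Int) ^ feladat18Count a - 1)

-- ===== PRECONDITION & SPEC =====
def Spec_feladat_18 (a : Int) (b : Int) (out : Int) : Prop := out = feladat_18_alt a b
instance (a : Int) (b : Int) (out : Int) : Decidable (Spec_feladat_18 a b out) := by unfold Spec_feladat_18; infer_instance

-- ===== CLAIM (what is proved, stated in full; the proofs are below) =====
def Claim_equal_feladat_18 : Prop := ∀ (a : Int) (b : Int), Dom_feladat_18 a b → Spec_feladat_18 a b (feladat_18 a b)

-- ===== LEMMAS AND PROOFS =====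
theorem feladat18Loop_eq (x y p : Int) :
    feladat18Loop x y p = p + y * ((2 : Int) ^ feladat18Count x - 1) := by
  induction x, y, p using feladat18Loop.induct with
  | case1 x y p hx hm ih =>
      rw [feladat18Loop, dif_pos hx, if_pos hm, ih]
      have hc : feladat18Count x = feladat18Count (PySem.Int.floordiv x 2) + 1 := by
        rw [feladat18Count, dif_pos ⟨hx, hm⟩]
      rw [hc, pow_succ]
      ring
  | case2 x y p hx hm =>
      rw [feladat18Loop, dif_pos hx, if_neg hm, feladat18Count, dif_neg (by tauto)]
      ring
  | case3 x y p hx =>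
      rw [feladat18Loop, dif_neg hx, feladat18Count, dif_neg (by tauto)]
      ring

-- ===== VERDICT (by name: the statement is the Claim_ definition above) =====
theorem feladat_18_spec : Claim_equal_feladat_18 := by
  intro a b _
  unfold Spec_feladat_18 feladat_18 feladat_18_alt
  rw [feladat18Loop_eq]
  ring
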